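-- pv_equiv track=rewrite | github.com/shionsuio/kaggle-harmonize | pipeline/format_converter.py | sort_modifications
-- ===== SOURCE A (Python) =====
-- def sort_modifications(mod_values):
--     """
--     Modification値をFixed→Variable順にソートする。
--     入力: ["NT=Oxidation;...;MT=Variable", "NT=Carbamidomethyl;...;MT=Fixed", ...]
--     出力: Fixed が先、Variable が後
--     """
--     fixed = []
--     variable = []
--     other = []
--     for val in mod_values:
--         if not val or val == "Not Applicable":
--             continue
--         val_lower = val.lower()
--         if "mt=fixed" in val_lower:
--             fixed.append(val)
--         elif "mt=variable" in val_lower: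
--             variable.append(val)
--         else:
--             other.append(val)
--     return fixed + variable + other
-- ===== SOURCE B (Python) =====
-- def sort_modifications(mod_values):
--     filtered = [v for v in mod_values if v and v != "Not Applicable"]
--
--     def key(v):
--         vl = v.lower()
--         if "mt=fixed" in vl:
--             return 0
--         if "mt=variable" in vl:
--             return 1
--         return 2
--
--     return sorted(filtered, key=key)
-- ===== Notes on version B (the rewrite author's own statement) =====
-- stated objective: idiomatic
-- what changed: Replaces the three-bucket append loop by a comprehension-filter followed by a single stable sort on a 0/1/2 priority key, relying on sort stability for the within-group order.
import Mathlib
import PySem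

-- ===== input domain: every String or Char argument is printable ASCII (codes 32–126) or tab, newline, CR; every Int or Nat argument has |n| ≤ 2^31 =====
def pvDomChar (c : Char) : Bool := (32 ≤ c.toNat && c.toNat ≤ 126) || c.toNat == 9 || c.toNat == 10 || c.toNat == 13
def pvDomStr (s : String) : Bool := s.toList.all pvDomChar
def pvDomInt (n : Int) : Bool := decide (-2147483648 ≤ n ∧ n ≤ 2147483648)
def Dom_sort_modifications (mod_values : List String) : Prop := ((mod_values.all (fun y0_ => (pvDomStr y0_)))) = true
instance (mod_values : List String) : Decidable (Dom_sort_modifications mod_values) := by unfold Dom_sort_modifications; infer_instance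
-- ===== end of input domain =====

-- B replaces A's three-bucket append loop by filter + one stable sort on a 0/1/2 priority key (idiomatic, same result).


-- ===== PORT A =====
def sort_modifications (mod_values : List String) : List String :=
  let st := mod_values.foldl
    (fun (st : List String × List String × List String) val =>
      if val == "" || val == "Not Applicable" then st
      else
        let val_lower := PySem.Str.lower val
        if PySem.Str.isIn "mt=fixed" val_lower then (st.1 ++ [val], st.2.1, st.2.2)
        else if PySem.Str.isIn "mt=variable" val_lower then (st.1, st.2.1 ++ [val], st.2.2)
        else (st.1, st.2.1, st.2.2 ++ [val]))
    ([], [], [])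
  st.1 ++ st.2.1 ++ st.2.2

-- ===== PORT B =====
-- B's key function: 0 for fixed, 1 for variable, 2 otherwise
def pvKey (v : String) : Int :=
  if PySem.Str.isIn "mt=fixed" (PySem.Str.lower v) then 0
  else if PySem.Str.isIn "mt=variable" (PySem.Str.lower v) then 1
  else 2

def sort_modifications_alt (mod_values : List String) : List String :=
  let filtered := mod_values.filter (fun v => !(v == "" || v == "Not Applicable"))
  PySem.List.sorted filtered pvKey false

-- ===== PRECONDITION & SPEC =====
def Spec_sort_modifications (mod_values : List String) (out : List String) : Prop := out = sort_modifications_alt mod_values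
instance (mod_values : List String) (out : List String) : Decidable (Spec_sort_modifications mod_values out) := by unfold Spec_sort_modifications; infer_instance

-- ===== CLAIM (what is proved, stated in full; the proofs are below) =====
def Claim_equal_sort_modifications : Prop := ∀ (mod_values : List String), Dom_sort_modifications mod_values → Spec_sort_modifications mod_values (sort_modifications mod_values)

-- ===== LEMMAS AND PROOFS =====

-- inserting x between a prefix it is not before and a suffix it is before
lemma insertBy_split {α : Type} (before : α → α → Bool) (x : α) : ∀ (p q : List α),
    (∀ y ∈ p, before x y = false) → (∀ y ∈ q, before x y = true) →
    PySem.List.insertBy before x (p ++ q) = p ++ x :: q := by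
  intro p
  induction p with
  | nil =>
    intro q _ hq
    cases q with
    | nil => simp [PySem.List.insertBy]
    | cons y ys => simp [PySem.List.insertBy, hq y (by simp)]
  | cons a p ih =>
    intro q hp hq
    simp only [List.cons_append, PySem.List.insertBy, hp a (by simp), Bool.false_eq_true,
      if_false, List.cons.injEq, true_and]
    exact ih q (fun y hy => hp y (by simp [hy])) hq

lemma pvKey_mem (v : String) : pvKey v = 0 ∨ pvKey v = 1 ∨ pvKey v = 2 := by
  unfold pvKey; split_ifs <;> simp

-- stable insertion sort with a 0/1/2-valued key produces the three filter buckets in order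
lemma sorted_buckets (xs : List String) : ∀ g0 g1 g2 : List String,
    (∀ y ∈ g0, pvKey y = 0) → (∀ y ∈ g1, pvKey y = 1) → (∀ y ∈ g2, pvKey y = 2) →
    xs.foldl (fun acc x => PySem.List.insertBy (fun a b => decide (pvKey a < pvKey b)) x acc)
      (g0 ++ g1 ++ g2)
    = (g0 ++ xs.filter (fun v => pvKey v == 0))
      ++ (g1 ++ xs.filter (fun v => pvKey v == 1))
      ++ (g2 ++ xs.filter (fun v => pvKey v == 2)) := by
  induction xs with
  | nil => intro g0 g1 g2 _ _ _; simp
  | cons x xs ih =>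
    intro g0 g1 g2 h0 h1 h2
    rcases pvKey_mem x with hx | hx | hx
    · have hins : PySem.List.insertBy (fun a b => decide (pvKey a < pvKey b)) x (g0 ++ g1 ++ g2)
          = (g0 ++ [x]) ++ g1 ++ g2 := by
        rw [List.append_assoc,
          insertBy_split _ x g0 (g1 ++ g2)
            (fun y hy => by simp [h0 y hy, hx])
            (fun y hy => by
              rcases List.mem_append.1 hy with hy | hy
              · simp [h1 y hy, hx]
              · simp [h2 y hy, hx])]
        simp
      have hrec := ih (g0 ++ [x]) g1 g2
        (by intro y hy; rcases List.mem_append.1 hy with hy | hy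
            · exact h0 y hy
            · simp at hy; subst hy; exact hx) h1 h2
      simp only [List.foldl_cons, hins, hrec]
      simp [hx]
    · have hins : PySem.List.insertBy (fun a b => decide (pvKey a < pvKey b)) x (g0 ++ g1 ++ g2)
          = g0 ++ (g1 ++ [x]) ++ g2 := by
        rw [insertBy_split _ x (g0 ++ g1) g2
            (fun y hy => by
              rcases List.mem_append.1 hy with hy | hy
              · simp [h0 y hy, hx]
              · simp [h1 y hy, hx])
            (fun y hy => by simp [h2 y hy, hx])]
        simp
      have hrec := ih g0 (g1 ++ [x]) g2 h0
        (by intro y hy; rcases List.mem_append.1 hy with hy | hy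
            · exact h1 y hy
            · simp at hy; subst hy; exact hx) h2
      simp only [List.foldl_cons, hins, hrec]
      simp [hx]
    · have hins : PySem.List.insertBy (fun a b => decide (pvKey a < pvKey b)) x (g0 ++ g1 ++ g2)
          = g0 ++ g1 ++ (g2 ++ [x]) := by
        have h := insertBy_split (fun a b => decide (pvKey a < pvKey b)) x (g0 ++ g1 ++ g2) []
            (fun y hy => by
              rcases List.mem_append.1 hy with hy | hy
              · rcases List.mem_append.1 hy with hy | hy
                · simp [h0 y hy, hx]
                · simp [h1 y hy, hx]
              · simp [h2 y hy, hx])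
            (fun y hy => by simp at hy)
        simpa using h
      have hrec := ih g0 g1 (g2 ++ [x]) h0 h1
        (by intro y hy; rcases List.mem_append.1 hy with hy | hy
            · exact h2 y hy
            · simp at hy; subst hy; exact hx)
      simp only [List.foldl_cons, hins, hrec]
      simp [hx]

-- the combined keep-and-classify predicates over the raw input
def pvF (i : Int) (v : String) : Bool := !(v == "" || v == "Not Applicable") && (pvKey v == i)

-- A's loop accumulates exactly the three filters
lemma foldlA (xs : List String) : ∀ f v o : List String,
    xs.foldl
      (fun (st : List String × List String × List String) val =>
        if val == "" || val == "Not Applicable" then st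
        else
          let val_lower := PySem.Str.lower val
          if PySem.Str.isIn "mt=fixed" val_lower then (st.1 ++ [val], st.2.1, st.2.2)
          else if PySem.Str.isIn "mt=variable" val_lower then (st.1, st.2.1 ++ [val], st.2.2)
          else (st.1, st.2.1, st.2.2 ++ [val])) (f, v, o)
    = (f ++ xs.filter (pvF 0), v ++ xs.filter (pvF 1), o ++ xs.filter (pvF 2)) := by
  induction xs with
  | nil => intro f v o; simp
  | cons x xs ih =>
    intro f v o
    simp only [List.foldl_cons]
    by_cases hk : (x == "" || x == "Not Applicable") = true
    · have e0 : pvF 0 x = false := by simp [pvF, hk]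
      have e1 : pvF 1 x = false := by simp [pvF, hk]
      have e2 : pvF 2 x = false := by simp [pvF, hk]
      simp only [hk, if_true, ih, List.filter_cons, e0, e1, e2, Bool.false_eq_true, if_false]
    · by_cases hf : PySem.Str.isIn "mt=fixed" (PySem.Str.lower x) = true
      · have ek : pvKey x = 0 := by simp only [pvKey, hf, if_true]
        have e0 : pvF 0 x = true := by simp [pvF, hk, ek]
        have e1 : pvF 1 x = false := by simp [pvF, ek]
        have e2 : pvF 2 x = false := by simp [pvF, ek]
        simp only [hk, Bool.false_eq_true, if_false, hf, if_true, ih, List.filter_cons,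
          e0, e1, e2]
        simp
      · by_cases hv : PySem.Str.isIn "mt=variable" (PySem.Str.lower x) = true
        · have ek : pvKey x = 1 := by
            simp only [pvKey, hf, Bool.false_eq_true, if_false, hv, if_true]
          have e0 : pvF 0 x = false := by simp [pvF, ek]
          have e1 : pvF 1 x = true := by simp [pvF, hk, ek]
          have e2 : pvF 2 x = false := by simp [pvF, ek]
          simp only [hk, Bool.false_eq_true, if_false, hf, hv, if_true, ih, List.filter_cons,
            e0, e1, e2]
          simp
        · have ek : pvKey x = 2 := by
            simp only [pvKey, hf, hv, Bool.false_eq_true, if_false]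
          have e0 : pvF 0 x = false := by simp [pvF, ek]
          have e1 : pvF 1 x = false := by simp [pvF, ek]
          have e2 : pvF 2 x = true := by simp [pvF, hk, ek]
          simp only [hk, Bool.false_eq_true, if_false, hf, hv, ih, List.filter_cons,
            e0, e1, e2]
          simp

lemma filter_keep_key (xs : List String) (i : Int) :
    (xs.filter (fun v => !(v == "" || v == "Not Applicable"))).filter (fun v => pvKey v == i)
      = xs.filter (pvF i) := by
  rw [List.filter_filter]
  exact List.filter_congr (fun a _ => by simp [pvF, Bool.and_comm])

-- ===== VERDICT (by name: the statement is the Claim_ definition above) =====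
theorem sort_modifications_spec : Claim_equal_sort_modifications := by
  intro xs _
  unfold Spec_sort_modifications sort_modifications sort_modifications_alt
  rw [PySem.List.sorted_eq_foldl_insertBy]
  have hb := sorted_buckets (xs.filter (fun v => !(v == "" || v == "Not Applicable")))
    [] [] [] (by simp) (by simp) (by simp)
  simp only [List.nil_append, List.append_nil] at hb
  rw [foldlA, hb]
  simp only [filter_keep_key, List.append_assoc, List.nil_append]
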